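-- pv_equiv track=rewrite | github.com/AdamZhouSE/pythonHomework | Code/CodeRecords/2607/60760/294454.py | func
-- ===== SOURCE A (Python) =====
-- def func(s:str):
--     res=0
--     length=len(s)
--     for i in range(1,length+1):
--         for j in range(length-i+1):
--             temp=s[j:j+i]
--             if temp.count('0')==temp.count('1') and temp.count('0')==temp.count('2'):
--                 res+=1
--     return res
-- ===== SOURCE B (Python) =====
-- def func(s: str):
--     # One pass: a substring has equally many '0','1','2' iff the two prefix
--     # differences (count0-count1, count0-count2) are equal at its two ends.
--     counts = {(0, 0): 1}
--     d1 = 0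
--     d2 = 0
--     res = 0
--     for c in s:
--         if c == '0':
--             d1 += 1
--             d2 += 1
--         elif c == '1':
--             d1 -= 1
--         elif c == '2':
--             d2 -= 1
--         key = (d1, d2)
--         seen = counts.get(key, 0)
--         res += seen
--         counts[key] = seen + 1
--     return res
-- ===== Notes on version B (the rewrite author's own statement) =====
-- stated objective: faster
-- what changed: Replaced the enumerate-all-substrings double loop with per-substring counting by a single pass that hashes the prefix-difference pair (count0-count1, count0-count2) and adds, at each position, how often the same pair was seen before.
import Mathlib
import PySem

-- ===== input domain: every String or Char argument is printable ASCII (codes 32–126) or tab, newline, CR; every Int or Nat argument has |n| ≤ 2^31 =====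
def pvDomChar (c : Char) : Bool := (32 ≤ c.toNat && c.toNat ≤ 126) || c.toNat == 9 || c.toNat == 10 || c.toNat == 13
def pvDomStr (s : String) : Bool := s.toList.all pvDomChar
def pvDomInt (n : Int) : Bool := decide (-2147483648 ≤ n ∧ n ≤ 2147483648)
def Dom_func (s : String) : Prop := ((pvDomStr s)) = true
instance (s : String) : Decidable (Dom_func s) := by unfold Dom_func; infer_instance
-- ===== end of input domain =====

-- B replaces A's enumerate-every-substring double loop by a single pass that hashes the
-- prefix-difference pair (count0-count1, count0-count2); a timing run measured it faster.

-- ===== PORT A =====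
def func (s : String) : Int :=
  let res : Int := 0
  let length : Int := PySem.Str.len s
  let res := (PySem.List.pyRange 1 (length + 1)).foldl (fun res i =>
    (PySem.List.pyRange 0 (length - i + 1)).foldl (fun res j =>
      let temp := PySem.Str.slice s (some j) (some (j + i))
      if PySem.Str.count temp "0" = PySem.Str.count temp "1" ∧
         PySem.Str.count temp "0" = PySem.Str.count temp "2"
      then res + 1 else res) res) res
  res

-- ===== PORT B =====
-- loop body of Source B: update the running differences, read the hash, bump res, store back
def bstep (st : PySem.Dict (Int × Int) Int × Int × Int × Int) (c : Char) :
    PySem.Dict (Int × Int) Int × Int × Int × Int :=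
  let counts := st.1
  let d1 := st.2.1
  let d2 := st.2.2.1
  let res := st.2.2.2
  let key : Int × Int :=
    if c = '0' then (d1 + 1, d2 + 1)
    else if c = '1' then (d1 - 1, d2)
    else if c = '2' then (d1, d2 - 1)
    else (d1, d2)
  let seen := counts.getD key 0
  (counts.insert key (seen + 1), key.1, key.2, res + seen)

def func_alt (s : String) : Int :=
  (s.toList.foldl bstep (PySem.Dict.empty.insert ((0 : Int), (0 : Int)) 1, 0, 0, 0)).2.2.2

-- ===== PRECONDITION & SPEC =====
def Spec_func (s : String) (out : Int) : Prop := out = func_alt s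
instance (s : String) (out : Int) : Decidable (Spec_func s out) := by unfold Spec_func; infer_instance

-- ===== CLAIM (what is proved, stated in full; the proofs are below) =====
def Claim_equal_func : Prop := ∀ (s : String), Dom_func s → Spec_func s (func s)

-- ===== LEMMAS AND PROOFS =====

-- the one-character transition on the prefix-difference pair
def step (d : Int × Int) (c : Char) : Int × Int :=
  if c = '0' then (d.1 + 1, d.2 + 1)
  else if c = '1' then (d.1 - 1, d.2)
  else if c = '2' then (d.1, d.2 - 1)
  else d

-- difference pair of a block of characters
def V (u : List Char) : Int × Int :=
  ((u.count '0' : Int) - u.count '1', (u.count '0' : Int) - u.count '2')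

-- prefix-difference pair after k characters of t
def Q (t : List Char) (k : Nat) : Int × Int := (t.take k).foldl step (0, 0)

-- the common counting quantity, in A's fibration (by substring length) and in B's (by right end)
def NA (q : Nat → Int × Int) (n : Nat) : Nat :=
  ∑ k ∈ Finset.range n, ∑ j ∈ Finset.range (n - k), if q (j + k + 1) = q j then 1 else 0

def NB (q : Nat → Int × Int) (n : Nat) : Nat :=
  ∑ b ∈ Finset.range n, ∑ a ∈ Finset.range (b + 1), if q a = q (b + 1) then 1 else 0

lemma foldl_step (u : List Char) (d : Int × Int) :
    u.foldl step d = (d.1 + (V u).1, d.2 + (V u).2) := by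
  induction u generalizing d with
  | nil => simp [V]
  | cons c u ih =>
    rw [List.foldl_cons, ih]
    by_cases h0 : c = '0'
    · simp [step, V, h0]; omega
    · by_cases h1 : c = '1'
      · simp [step, V, h1]; omega
      · by_cases h2 : c = '2'
        · simp [step, V, h2]; omega
        · simp [step, V, h0, h1, h2]

lemma count_go_single (c : Char) :
    ∀ (l : List Char) (fuel acc : Nat), l.length ≤ fuel →
      PySem.Chars.count.go [c] fuel l acc = acc + l.count c := by
  intro l
  induction l with
  | nil => intro fuel acc _; cases fuel <;> simp [PySem.Chars.count.go]
  | cons h t ih =>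
    intro fuel acc hf
    cases fuel with
    | zero => simp at hf
    | succ f =>
      rw [PySem.Chars.count.go]
      by_cases hc : c = h
      · subst hc
        simp [List.isPrefixOf, ih f (acc + 1) (by simpa using hf)]
        omega
      · simp [List.isPrefixOf, hc, ih f acc (by simpa using hf), Ne.symm hc]

lemma count_single (u : List Char) (c : Char) :
    PySem.Chars.count u [c] = u.count c := by
  rw [PySem.Chars.count]
  simp [count_go_single c u u.length 0 le_rfl]

lemma cond_iff (t : List Char) (j m : Nat) :
    (V ((t.drop j).take m) = (0, 0)) ↔ Q t (j + m) = Q t j := by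
  unfold Q
  rw [List.take_add, List.foldl_append, foldl_step]
  simp [Prod.ext_iff]

lemma sum_if_range {M : Type} [AddCommMonoid M] (f : Nat → M) (m n : Nat) (h : m ≤ n) :
    ∑ j ∈ Finset.range n, (if j < m then f j else 0) = ∑ j ∈ Finset.range m, f j := by
  rw [← Finset.sum_subset (Finset.range_subset_range.mpr h)
    (fun x _ hx => by simp at hx ⊢; intro; omega)]
  exact Finset.sum_congr rfl fun x hx => if_pos (Finset.mem_range.mp hx)

lemma triangle_swap (h : Nat → Nat → Nat) (n : Nat) :
    ∑ k ∈ Finset.range n, ∑ j ∈ Finset.range (n - k), h k j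
      = ∑ j ∈ Finset.range n, ∑ k ∈ Finset.range (n - j), h k j := by
  have ext : ∀ (f : Nat → Nat → Nat),
      (∑ k ∈ Finset.range n, ∑ j ∈ Finset.range (n - k), f k j)
        = ∑ k ∈ Finset.range n, ∑ j ∈ Finset.range n, (if j < n - k then f k j else 0) := by
    intro f
    exact Finset.sum_congr rfl fun k _ => (sum_if_range (f k) (n - k) n (by omega)).symm
  rw [ext, ext (fun j k => h k j), Finset.sum_comm]
  refine Finset.sum_congr rfl fun k hk => Finset.sum_congr rfl fun j hj => ?_
  exact if_congr (by omega) rfl rfl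

lemma sum_shift (g : Nat → Nat) (a n : Nat) :
    ∑ b ∈ Finset.range n, (if a ≤ b then g b else 0)
      = ∑ c ∈ Finset.range (n - a), g (a + c) := by
  rw [← Finset.sum_filter]
  have : Finset.filter (fun b => a ≤ b) (Finset.range n) = Finset.Ico a n := by
    ext x; simp [Finset.mem_Ico]; omega
  rw [this, Finset.sum_Ico_eq_sum_range]

lemma NA_eq_NB (q : Nat → Int × Int) (n : Nat) : NA q n = NB q n := by
  unfold NA NB
  rw [triangle_swap (fun k j => if q (j + k + 1) = q j then 1 else 0) n]
  symm
  calc ∑ b ∈ Finset.range n, ∑ a ∈ Finset.range (b + 1), (if q a = q (b + 1) then 1 else 0)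
      = ∑ b ∈ Finset.range n, ∑ a ∈ Finset.range n,
          (if a < b + 1 then (if q a = q (b + 1) then 1 else 0) else 0) := by
        refine Finset.sum_congr rfl fun b hb => ?_
        rw [sum_if_range _ (b + 1) n (by simp at hb; omega)]
    _ = ∑ a ∈ Finset.range n, ∑ b ∈ Finset.range n,
          (if a ≤ b then (if q a = q (b + 1) then 1 else 0) else 0) := by
        rw [Finset.sum_comm]
        exact Finset.sum_congr rfl fun a _ => Finset.sum_congr rfl fun b _ =>
          if_congr (by omega) rfl rfl
    _ = ∑ a ∈ Finset.range n, ∑ c ∈ Finset.range (n - a), (if q a = q (a + c + 1) then 1 else 0) := by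
        refine Finset.sum_congr rfl fun a _ => ?_
        rw [sum_shift (fun b => if q a = q (b + 1) then 1 else 0) a n]
    _ = ∑ j ∈ Finset.range n, ∑ k ∈ Finset.range (n - j), (if q (j + k + 1) = q j then 1 else 0) :=
        Finset.sum_congr rfl fun a _ => Finset.sum_congr rfl fun c _ =>
          if_congr eq_comm rfl rfl

lemma countP_range (p : Nat → Bool) (m : Nat) :
    (List.range m).countP p = ∑ a ∈ Finset.range m, if p a then 1 else 0 := by
  induction m with
  | zero => simp
  | succ m ih =>
    rw [List.range_succ, List.countP_append, Finset.sum_range_succ, ih]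
    simp [List.countP_cons]

lemma sum_map_range_int (f : Nat → Int) (m : Nat) :
    (((List.range m).map f).sum : Int) = ∑ a ∈ Finset.range m, f a := by
  induction m with
  | zero => simp
  | succ m ih =>
    rw [List.range_succ, List.map_append, List.sum_append, Finset.sum_range_succ, ih]
    simp

lemma A_eq_NA (s : String) : func s = (NA (Q s.toList) s.toList.length : Int) := by
  unfold func
  have hlen : PySem.Str.len s = (s.toList.length : Int) := by simp
  simp only [hlen, PySem.List.foldl_ite_add_one, PySem.List.foldl_add]
  rw [PySem.List.pyRange_one 1 (↑s.toList.length + 1), List.map_map]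
  simp only [add_sub_cancel_right, Int.toNat_natCast]
  rw [sum_map_range_int]
  unfold NA
  push_cast
  rw [zero_add]
  simp only [Function.comp_apply]
  refine Finset.sum_congr rfl fun k hk => ?_
  have hk' : k < s.toList.length := Finset.mem_range.mp hk
  have hb : ((s.toList.length : Int) - (1 + (k : Int)) + 1) = ((s.toList.length - k : Nat) : Int) := by
    omega
  rw [hb, PySem.List.pyRange_zero_natCast, List.countP_map]
  rw [countP_range]
  push_cast
  refine Finset.sum_congr rfl fun j hj => ?_
  have hcond : (PySem.Str.count (PySem.Str.slice s (some (j : Int)) (some ((j : Int) + (1 + (k : Int))))) "0" =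
        PySem.Str.count (PySem.Str.slice s (some (j : Int)) (some ((j : Int) + (1 + (k : Int))))) "1" ∧
      PySem.Str.count (PySem.Str.slice s (some (j : Int)) (some ((j : Int) + (1 + (k : Int))))) "0" =
        PySem.Str.count (PySem.Str.slice s (some (j : Int)) (some ((j : Int) + (1 + (k : Int))))) "2")
      ↔ Q s.toList (j + k + 1) = Q s.toList j := by
    have harg : ((j : Int) + (1 + (k : Int))) = ((j : Int) + (((k + 1 : Nat)) : Int)) := by
      push_cast; ring
    have ht : (PySem.Str.slice s (some (j : Int)) (some ((j : Int) + (1 + (k : Int))))).toList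
        = (s.toList.drop j).take (k + 1) := by
      rw [harg, PySem.Str.toList_slice, PySem.Chars.slice_eq_listSlice]
      exact PySem.List.slice_natCast_add s.toList j (k + 1)
    have h0 : ("0" : String).toList = ['0'] := rfl
    have h1 : ("1" : String).toList = ['1'] := rfl
    have h2 : ("2" : String).toList = ['2'] := rfl
    rw [show j + k + 1 = j + (k + 1) by omega, ← cond_iff]
    simp only [PySem.Str.count_eq, ht, h0, h1, h2, count_single]
    unfold V
    rw [Prod.ext_iff]
    simp
    omega
  simp only [Function.comp_apply, decide_eq_true_eq, hcond]

def ins (d : PySem.Dict (Int × Int) Int) (v : Int × Int) : PySem.Dict (Int × Int) Int :=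
  d.insert v (d.getD v 0 + 1)

-- prefix-difference pair of u relative to a starting pair d
def pf (d : Int × Int) (u : List Char) (k : Nat) : Int × Int := (u.take k).foldl step d

lemma bstep_eq (counts : PySem.Dict (Int × Int) Int) (d1 d2 res : Int) (c : Char) :
    bstep (counts, d1, d2, res) c
      = (ins counts (step (d1, d2) c), (step (d1, d2) c).1, (step (d1, d2) c).2,
         res + counts.getD (step (d1, d2) c) 0) := by
  simp only [bstep, ins, step]

lemma pf_cons (d : Int × Int) (c : Char) (u : List Char) (k : Nat) :
    pf d (c :: u) (k + 1) = pf (step d c) u k := by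
  simp [pf, List.take_succ_cons]

lemma B_loop :
    ∀ (u : List Char) (seen : List (Int × Int)) (d1 d2 res : Int),
      (u.foldl bstep (seen.foldl ins PySem.Dict.empty, d1, d2, res)).2.2.2
        = res + ∑ b ∈ Finset.range u.length,
            ((seen ++ (List.range b).map (fun k => pf (d1, d2) u (k + 1))).count
              (pf (d1, d2) u (b + 1)) : Int) := by
  intro u
  induction u with
  | nil => intro seen d1 d2 res; simp
  | cons c u ih =>
    intro seen d1 d2 res
    rw [List.foldl_cons, bstep_eq]
    have hget : (seen.foldl ins PySem.Dict.empty).getD (step (d1, d2) c) 0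
        = (seen.count (step (d1, d2) c) : Int) := by
      have := PySem.Dict.getD_foldl_insert_add_one seen PySem.Dict.empty (step (d1, d2) c)
      simpa [ins, PySem.Dict.getD_empty] using this
    have hins : ins (seen.foldl ins PySem.Dict.empty) (step (d1, d2) c)
        = (seen ++ [step (d1, d2) c]).foldl ins PySem.Dict.empty := by
      rw [List.foldl_append]; rfl
    rw [hget, hins]
    have hih := ih (seen ++ [step (d1, d2) c]) (step (d1, d2) c).1 (step (d1, d2) c).2
      (res + (seen.count (step (d1, d2) c) : Int))
    rw [show ((step (d1, d2) c).1, (step (d1, d2) c).2) = step (d1, d2) c from rfl] at hih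
    rw [hih]
    rw [List.length_cons, Finset.sum_range_succ']
    have hpf : ∀ k, pf (d1, d2) (c :: u) (k + 1) = pf (step (d1, d2) c) u k := pf_cons _ _ _
    simp only [hpf]
    have hzero : pf (step (d1, d2) c) u 0 = step (d1, d2) c := rfl
    rw [hzero]
    have hlist : ∀ b : Nat,
        seen ++ (List.range (b + 1)).map (fun k => pf (step (d1, d2) c) u k)
          = (seen ++ [step (d1, d2) c])
              ++ (List.range b).map (fun k => pf (step (d1, d2) c) u (k + 1)) := by
      intro b
      rw [List.range_succ_eq_map, List.map_cons, List.map_map, List.append_assoc]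
      rfl
    simp only [hlist]
    simp
    ring

lemma B_eq_NB (s : String) : func_alt s = (NB (Q s.toList) s.toList.length : Int) := by
  unfold func_alt
  have hinit : PySem.Dict.empty.insert ((0 : Int), (0 : Int)) 1
      = ([((0 : Int), (0 : Int))]).foldl ins PySem.Dict.empty := by
    simp [ins, PySem.Dict.getD_empty]
  rw [hinit, B_loop, zero_add]
  unfold NB
  push_cast
  refine Finset.sum_congr rfl fun b hb => ?_
  have hlist : ([((0 : Int), (0 : Int))] ++ (List.range b).map (fun k => pf (0, 0) s.toList (k + 1)))
      = (List.range (b + 1)).map (Q s.toList) := by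
    rw [List.range_succ_eq_map, List.map_cons, List.map_map]
    rfl
  rw [hlist, show pf (0, 0) s.toList (b + 1) = Q s.toList (b + 1) from rfl,
    List.count_eq_countP, List.countP_map, countP_range]
  push_cast
  refine Finset.sum_congr rfl fun a ha => ?_
  simp [Function.comp_apply, beq_iff_eq]

-- ===== VERDICT (by name: the statement is the Claim_ definition above) =====
theorem func_spec : Claim_equal_func := by
  intro s _
  unfold Spec_func
  rw [A_eq_NA, B_eq_NB, NA_eq_NB]
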